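-- pv_equiv track=rewrite | github.com/Javert899/pm4py-mdl | pm4pymdl/visualization/mvp/gen_framework2/versions/util.py | get_activity_map_eo_frequency
-- ===== SOURCE A (Python) =====
-- from collections import Counter
--
-- def get_activity_map_eo_frequency(key, res):
--     activities = [x for x in res["acti_spec"] if x[0] == key]
--     activities_map = {}
--     for x in activities:
--         k = x[1]
--         if k not in activities_map:
--             activities_map[k] = Counter()
--         activities_map[k][x[2]] += res["acti_spec"][x]
--     for k in activities_map:
--         activities_map[k] = sum(activities_map[k].values())
--     return activities_map
-- ===== SOURCE B (Python) =====
-- def get_activity_map_eo_frequency(key, res):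
--     activities_map = {}
--     for x, v in res["acti_spec"].items():
--         if x[0] != key:
--             continue
--         activities_map[x[1]] = activities_map.get(x[1], 0) + v
--     return activities_map
-- ===== Notes on version B (the rewrite author's own statement) =====
-- stated objective: simpler
-- what changed: B replaces A's three passes (pre-filter list of keys, per-(x[1],x[2]) Counter table built with repeated dict lookups, final summing pass) by one direct pass over res['acti_spec'].items() that keeps a single running total per x[1].
import Mathlib
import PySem

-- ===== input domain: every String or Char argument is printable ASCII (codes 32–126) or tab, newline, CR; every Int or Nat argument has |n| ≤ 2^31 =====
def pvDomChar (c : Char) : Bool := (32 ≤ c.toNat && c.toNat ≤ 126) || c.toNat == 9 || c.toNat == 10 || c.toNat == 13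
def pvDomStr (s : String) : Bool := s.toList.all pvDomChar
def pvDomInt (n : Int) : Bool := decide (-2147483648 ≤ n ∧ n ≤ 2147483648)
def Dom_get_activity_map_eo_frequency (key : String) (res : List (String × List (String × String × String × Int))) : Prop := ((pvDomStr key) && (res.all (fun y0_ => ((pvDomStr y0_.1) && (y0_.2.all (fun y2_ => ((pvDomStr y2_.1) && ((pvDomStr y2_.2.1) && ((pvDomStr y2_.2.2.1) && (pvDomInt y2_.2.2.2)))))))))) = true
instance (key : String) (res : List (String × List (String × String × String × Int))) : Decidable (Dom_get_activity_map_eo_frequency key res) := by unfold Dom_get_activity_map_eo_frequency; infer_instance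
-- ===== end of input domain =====

-- B is one direct pass over res["acti_spec"].items() keeping a running total per x[1],
-- instead of A's pre-filtered key list, nested per-x[2] Counter table and final summing pass (objective: simpler).

-- ===== PORT A =====
-- the tuple key (x[0], x[1], x[2]) of an item of the inner dict res["acti_spec"]
def pvKey3 (p : String × String × String × Int) : String × String × String := (p.1, p.2.1, p.2.2.1)

-- res["acti_spec"][x] : first-match lookup by tuple key (x is always a key of spec when A uses it, so the
-- KeyError default 0 is never taken)
def pvLookup3 (spec : List (String × String × String × Int)) (x : String × String × String) : Int :=
  match spec.find? (fun q => pvKey3 q == x) with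
  | some q => q.2.2.2
  | none => 0

def get_activity_map_eo_frequency (key : String) (res : List (String × List (String × String × String × Int))) : List (String × Int) :=
  match (PySem.Dict.mk res).get? "acti_spec" with
  | none => []  -- Python raises KeyError here; excluded by Pre_
  | some spec =>
    -- activities = [x for x in res["acti_spec"] if x[0] == key]
    let activities := (spec.map pvKey3).filter (fun x => x.1 == key)
    -- the Counter-table loop
    let am : PySem.Dict String (PySem.Dict String Int) :=
      activities.foldl (fun am x =>
        let am := if am.contains x.2.1 then am else am.insert x.2.1 PySem.Dict.empty
        am.modify x.2.1 PySem.Dict.empty (fun c => c.modify x.2.2 0 (· + pvLookup3 spec x)))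
        PySem.Dict.empty
    -- for k in activities_map: activities_map[k] = sum(activities_map[k].values())
    am.items.map (fun p => (p.1, p.2.values.sum))

-- ===== PORT B =====
def get_activity_map_eo_frequency_alt (key : String) (res : List (String × List (String × String × String × Int))) : List (String × Int) :=
  match (PySem.Dict.mk res).get? "acti_spec" with
  | none => []  -- Python raises KeyError here; excluded by Pre_
  | some spec =>
    (spec.foldl (fun m p =>
        if p.1 != key then m
        else m.insert p.2.1 (m.getD p.2.1 0 + p.2.2.2))
      (PySem.Dict.empty : PySem.Dict String Int)).items

-- ===== PRECONDITION & SPEC =====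
-- Pre_ excludes (a) res without an "acti_spec" entry, on which A raises KeyError, and (b) inner lists with
-- duplicate tuple keys, which do not represent a Python dict (a dict has unique keys) so any behaviour on
-- them is an accident of the association-list representation.
def Pre_get_activity_map_eo_frequency (key : String) (res : List (String × List (String × String × String × Int))) : Prop :=
  "acti_spec" ∈ res.map Prod.fst ∧
  ((((PySem.Dict.mk res).getD "acti_spec" []).map pvKey3).Nodup)

instance (key : String) (res : List (String × List (String × String × String × Int))) : Decidable (Pre_get_activity_map_eo_frequency key res) := by unfold Pre_get_activity_map_eo_frequency; infer_instance

def pvWitness_get_activity_map_eo_frequency : String × (List (String × List (String × String × String × Int))) :=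
  ("k", [("acti_spec", [("k", "a", "b", (1 : Int)), ("k", "a", "c", (2 : Int)), ("z", "a", "b", (5 : Int))])])

def Spec_get_activity_map_eo_frequency (key : String) (res : List (String × List (String × String × String × Int))) (out : List (String × Int)) : Prop := out = get_activity_map_eo_frequency_alt key res
instance (key : String) (res : List (String × List (String × String × String × Int))) (out : List (String × Int)) : Decidable (Spec_get_activity_map_eo_frequency key res out) := by unfold Spec_get_activity_map_eo_frequency; infer_instance

-- ===== CLAIM (what is proved, stated in full; the proofs are below) =====
def Claim_equal_get_activity_map_eo_frequency : Prop := ∀ (key : String) (res : List (String × List (String × String × String × Int))), Dom_get_activity_map_eo_frequency key res → Pre_get_activity_map_eo_frequency key res → Spec_get_activity_map_eo_frequency key res (get_activity_map_eo_frequency key res)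

-- ===== LEMMAS AND PROOFS =====

-- the abstraction that relates A's nested table to B's flat accumulator: each counter collapsed to the sum of its values
def pvFlat (am : PySem.Dict String (PySem.Dict String Int)) : PySem.Dict String Int :=
  PySem.Dict.mk (am.items.map (fun p => (p.1, p.2.values.sum)))

theorem pvFlat_items (am : PySem.Dict String (PySem.Dict String Int)) :
    (pvFlat am).items = am.items.map (fun p => (p.1, p.2.values.sum)) := rfl

theorem pvFlat_get? (am : PySem.Dict String (PySem.Dict String Int)) (k : String) :
    (pvFlat am).get? k = (am.get? k).map (fun c => c.values.sum) := by
  simp [pvFlat, PySem.Dict.get?, List.find?_map, Option.map_map, Function.comp_def]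

theorem pvFlat_contains (am : PySem.Dict String (PySem.Dict String Int)) (k : String) :
    (pvFlat am).contains k = am.contains k := by
  simp [pvFlat, PySem.Dict.contains, List.any_map, Function.comp_def]

-- updating one counter entry adds exactly v to the sum of its values (counters have unique keys)
theorem pvSum_aux (l : List (String × Int)) (t : String) (v : Int) (h : (l.map Prod.fst).Nodup) :
    ((PySem.Dict.mk l).modify t 0 (· + v)).values.sum = (PySem.Dict.mk l).values.sum + v := by
  induction l with
  | nil =>
    simp [PySem.Dict.modify, PySem.Dict.insert, PySem.Dict.contains, PySem.Dict.getD,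
      PySem.Dict.get?, PySem.Dict.values]
  | cons a l ih =>
    obtain ⟨k, w⟩ := a
    simp only [List.map_cons, List.nodup_cons] at h
    obtain ⟨ha, hnd⟩ := h
    by_cases hat : k = t
    · subst hat
      have hmapid : ∀ z : Int,
          List.map ((fun x : String × Int => x.2) ∘ fun p => if p.1 = k then (k, z) else p) l
            = List.map (fun x : String × Int => x.2) l := by
        intro z
        apply List.map_congr_left
        intro p hp
        have : ¬ (p.1 = k) := by
          intro he; exact ha (by simpa [he] using List.mem_map_of_mem (f := Prod.fst) hp)
        simp [this]
      simp [PySem.Dict.modify, PySem.Dict.insert, PySem.Dict.contains, PySem.Dict.getD,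
        PySem.Dict.get?, PySem.Dict.values, hmapid]
      omega
    · have hne : (k == t) = false := by simpa using hat
      have ihs := ih hnd
      simp only [PySem.Dict.modify, PySem.Dict.insert, PySem.Dict.contains, PySem.Dict.getD,
        PySem.Dict.get?, PySem.Dict.values, List.any_cons, List.find?_cons, hne,
        Bool.false_or] at ihs ⊢
      by_cases hc : (l.any fun p => p.1 == t) = true
      · simp [hc, hat] at ihs ⊢
        omega
      · simp only [Bool.not_eq_true] at hc
        simp [hc] at ihs ⊢
        omega

theorem pvMem_values_of_get? (am : PySem.Dict String (PySem.Dict String Int)) (k : String)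
    (c : PySem.Dict String Int) (h : am.get? k = some c) : c ∈ am.values := by
  simp only [PySem.Dict.get?, Option.map_eq_some_iff] at h
  obtain ⟨p, hp, hpc⟩ := h
  exact hpc ▸ List.mem_map_of_mem (List.mem_of_find?_eq_some hp)

-- one iteration of A's Counter-table loop corresponds under pvFlat to one iteration of B's loop
theorem pvStep_flat (am : PySem.Dict String (PySem.Dict String Int)) (k s : String) (v : Int)
    (hc : ∀ c ∈ am.values, c.keys.Nodup) :
    pvFlat ((if am.contains k then am else am.insert k PySem.Dict.empty).modify k PySem.Dict.empty
        (fun c => c.modify s 0 (· + v)))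
      = (pvFlat am).insert k ((pvFlat am).getD k 0 + v) := by
  by_cases hcon : am.contains k = true
  · rw [if_pos hcon]
    obtain ⟨c₀, hg⟩ : ∃ c, am.get? k = some c := by
      rw [PySem.Dict.contains_eq_isSome_get?] at hcon
      exact Option.isSome_iff_exists.mp hcon
    have hc₀ : c₀.keys.Nodup := hc c₀ (pvMem_values_of_get? am k c₀ hg)
    have hsum : (c₀.modify s 0 (· + v)).values.sum = c₀.values.sum + v := pvSum_aux c₀.items s v hc₀
    have hgd : am.getD k PySem.Dict.empty = c₀ := PySem.Dict.getD_of_get?_eq_some am PySem.Dict.empty hg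
    have hfgd : (pvFlat am).getD k 0 = c₀.values.sum := by
      rw [PySem.Dict.getD_eq_get?_getD, pvFlat_get?, hg]; rfl
    have hfcon : (pvFlat am).contains k = true := by rw [pvFlat_contains]; exact hcon
    apply PySem.Dict.ext
    rw [pvFlat_items, PySem.Dict.modify, hgd,
      PySem.Dict.items_insert_of_contains _ _ hcon,
      PySem.Dict.items_insert_of_contains _ _ hfcon, hfgd, pvFlat_items,
      List.map_map, List.map_map]
    apply List.map_congr_left
    intro p hp
    by_cases hpk : p.1 = k
    · simp [hpk, hsum]
    · simp [hpk]
  · have hcon' : am.contains k = false := by simpa using hcon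
    rw [if_neg (by simp [hcon'])]
    have hnew : (am.insert k PySem.Dict.empty).get? k = some PySem.Dict.empty :=
      PySem.Dict.get?_insert_self am k _
    have hcon2 : (am.insert k PySem.Dict.empty).contains k = true := by
      rw [PySem.Dict.contains_eq_isSome_get?, hnew]; rfl
    have hgd : (am.insert k PySem.Dict.empty).getD k PySem.Dict.empty = PySem.Dict.empty :=
      PySem.Dict.getD_of_get?_eq_some (am.insert k PySem.Dict.empty) PySem.Dict.empty hnew
    have hitems1 : (am.insert k PySem.Dict.empty).items = am.items ++ [(k, PySem.Dict.empty)] :=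
      PySem.Dict.items_insert_of_not_contains am _ hcon'
    have hnomatch : ∀ p ∈ am.items, (p.1 == k) = false := by
      intro p hp
      have hany : am.items.any (fun p => p.1 == k) = false := hcon'
      simpa using (List.any_eq_false.mp hany) p hp
    have hfgd : (pvFlat am).getD k 0 = 0 := by
      rw [PySem.Dict.getD_eq_get?_getD, pvFlat_get?,
        (PySem.Dict.get?_eq_none_iff_contains am k).mpr hcon']; rfl
    have hfcon : (pvFlat am).contains k = false := by rw [pvFlat_contains]; exact hcon'
    have hvsum : (PySem.Dict.empty.modify s 0 (· + v)).values.sum = 0 + v := by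
      simpa using pvSum_aux [] s v (by simp)
    apply PySem.Dict.ext
    rw [pvFlat_items, PySem.Dict.modify, hgd,
      PySem.Dict.items_insert_of_contains _ _ hcon2, hitems1,
      PySem.Dict.items_insert_of_not_contains _ _ hfcon, hfgd, pvFlat_items,
      List.map_map, List.map_append]
    congr 1
    · apply List.map_congr_left
      intro p hp
      have hne : ¬ p.1 = k := by simpa using hnomatch p hp
      simp [hne]
    · simp [hvsum]

theorem pvStep_nodup (am : PySem.Dict String (PySem.Dict String Int)) (k s : String) (v : Int)
    (hc : ∀ c ∈ am.values, c.keys.Nodup) :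
    ∀ c ∈ ((if am.contains k then am else am.insert k PySem.Dict.empty).modify k PySem.Dict.empty
        (fun c => c.modify s 0 (· + v))).values, c.keys.Nodup := by
  intro c hcm
  have hbase : ∀ c ∈ (if am.contains k then am else am.insert k PySem.Dict.empty).values, c.keys.Nodup := by
    intro c hcm
    split at hcm
    · exact hc c hcm
    · rcases PySem.Dict.mem_values_insert _ _ _ _ hcm with h | h
      · subst h; simp [PySem.Dict.empty, PySem.Dict.keys]
      · exact hc c h
  rw [PySem.Dict.modify] at hcm
  rcases PySem.Dict.mem_values_insert _ _ _ _ hcm with h | h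
  · subst h
    rw [PySem.Dict.modify]
    apply PySem.Dict.nodup_keys_insert
    set d := if am.contains k then am else am.insert k PySem.Dict.empty with hd
    rcases hg : d.get? k with _ | c₁
    · rw [PySem.Dict.getD_eq_get?_getD, hg]
      simp [PySem.Dict.empty, PySem.Dict.keys]
    · rw [PySem.Dict.getD_eq_get?_getD, hg]
      refine hbase c₁ ?_
      simp only [PySem.Dict.get?, Option.map_eq_some_iff] at hg
      obtain ⟨p, hp, hpc⟩ := hg
      exact hpc ▸ List.mem_map_of_mem (List.mem_of_find?_eq_some hp)
  · exact hbase c h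

-- the whole loops correspond under pvFlat
theorem pvFold_flat (l : List (String × String × String × Int)) (am : PySem.Dict String (PySem.Dict String Int))
    (hc : ∀ c ∈ am.values, c.keys.Nodup) :
    pvFlat (l.foldl (fun am p =>
        (if am.contains p.2.1 then am else am.insert p.2.1 PySem.Dict.empty).modify p.2.1 PySem.Dict.empty
          (fun c => c.modify p.2.2.1 0 (· + p.2.2.2))) am)
      = l.foldl (fun m p => m.insert p.2.1 (m.getD p.2.1 0 + p.2.2.2)) (pvFlat am) := by
  induction l generalizing am with
  | nil => rfl
  | cons p l ih =>
    simp only [List.foldl_cons]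
    rw [ih _ (pvStep_nodup am p.2.1 p.2.2.1 p.2.2.2 hc),
      pvStep_flat am p.2.1 p.2.2.1 p.2.2.2 hc]

-- under unique tuple keys, looking an item's own key back up returns its value
theorem pvLookup3_eq (spec : List (String × String × String × Int)) (p : String × String × String × Int)
    (hnd : (spec.map pvKey3).Nodup) (hp : p ∈ spec) : pvLookup3 spec (pvKey3 p) = p.2.2.2 := by
  induction spec with
  | nil => cases hp
  | cons a l ih =>
    simp only [List.map_cons, List.nodup_cons] at hnd
    obtain ⟨ha, hnd⟩ := hnd
    rw [pvLookup3, List.find?_cons]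
    by_cases hb : (pvKey3 a == pvKey3 p) = true
    · rw [hb]
      have : p = a := by
        rcases List.mem_cons.mp hp with h | h
        · exact h
        · exact absurd ((eq_of_beq hb) ▸ List.mem_map_of_mem (f := pvKey3) h) ha
      simp [this]
    · rw [Bool.not_eq_true] at hb
      rw [hb]
      have hpl : p ∈ l := by
        rcases List.mem_cons.mp hp with h | h
        · subst h; simp at hb
        · exact h
      exact ih hnd hpl

-- ===== VERDICT (by name: the statement is the Claim_ definition above) =====
theorem get_activity_map_eo_frequency_spec : Claim_equal_get_activity_map_eo_frequency := by
  intro key res _hdom hpre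
  obtain ⟨hmem, hnd⟩ := hpre
  rcases hget : (PySem.Dict.mk res).get? "acti_spec" with _ | spec
  · exact absurd hmem (by
      simpa [PySem.Dict.keys] using
        (PySem.Dict.get?_eq_none_iff_not_mem_keys (PySem.Dict.mk res) "acti_spec").mp hget)
  · have hspec : (PySem.Dict.mk res).getD "acti_spec" [] = spec :=
      PySem.Dict.getD_of_get?_eq_some (PySem.Dict.mk res) [] hget
    rw [hspec] at hnd
    unfold Spec_get_activity_map_eo_frequency get_activity_map_eo_frequency get_activity_map_eo_frequency_alt
    rw [hget]
    simp only
    -- A's filtered key list is the map of the filtered item list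
    have hact : (spec.map pvKey3).filter (fun x => x.1 == key)
        = (spec.filter (fun p => p.1 == key)).map pvKey3 := by
      rw [List.filter_map]; rfl
    rw [hact, List.foldl_map]
    -- replace the lookup of each item's own key by its stored value (unique keys)
    rw [PySem.List.foldl_congr_mem _ _
      (fun am p =>
        (if am.contains p.2.1 then am else am.insert p.2.1 PySem.Dict.empty).modify p.2.1 PySem.Dict.empty
          (fun c => c.modify p.2.2.1 0 (· + p.2.2.2))) _
      (by
        intro am p hp
        have hps : p ∈ spec := (List.mem_filter.mp hp).1
        rw [pvLookup3_eq spec p hnd hps]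
        rfl)]
    -- B's guarded fold is the fold over the filtered items
    have hB : (spec.foldl (fun m p =>
          if p.1 != key then m
          else m.insert p.2.1 (m.getD p.2.1 0 + p.2.2.2))
        (PySem.Dict.empty : PySem.Dict String Int))
        = (spec.filter (fun p => p.1 == key)).foldl
            (fun m p => m.insert p.2.1 (m.getD p.2.1 0 + p.2.2.2)) PySem.Dict.empty := by
      rw [← PySem.List.foldl_if_eq_foldl_filter]
      apply PySem.List.foldl_congr_mem
      intro m p _
      rcases hb : (p.1 == key) with _ | _ <;> simp [bne, hb]
    rw [hB]
    -- A's final summing pass is pvFlat; conclude with the fold correspondence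
    exact congrArg PySem.Dict.items
      (pvFold_flat (spec.filter (fun p => p.1 == key)) PySem.Dict.empty
        (by simp [PySem.Dict.empty, PySem.Dict.values]))
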